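-- pv_equiv track=rewrite | github.com/RNGDelak/RNGDelak.github.io | External files/Project/bms and psi/bashicu matrix system with buchholz ordinal comparison.py | asc_bp
-- ===== SOURCE A (Python) =====
-- def extract(m, xy):
--     x, y = xy
--     if x > len(m) - 1 or x < 0 or y < 0:
--         return -1
--     if y > len(m[x]) - 1:
--         return 0
--     return m[x][y]
--
-- def zero(m, x):
--     if extract(m, [x, 0]) < 1:
--         return 1
--     return 0
--
-- def is_ancestor(m, xa, x, y):
--     if xa == x:
--         return 1
--     if zero(m, x):
--         return 0
--     if y < 0:
--         return 1
--     p = x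
--     while p >= xa:
--         if extract(m, [p, y]) < extract(m, [x, y]) and is_ancestor(m, p, x, y - 1):
--             x = p
--             if xa == x:
--                 return 1
--         p -= 1
--     return 0
--
-- def asc_bp(bad_part, asc_col, n):
--     abp = []
--     y = max(len(asc_col), max(len(row) for row in bad_part))
--     for i in range(len(bad_part)):
--         abp.append([])
--         for j in range(y):
--             abp[i].append(extract(bad_part, [i, j]) + (extract([asc_col], [0, j]) * n if is_ancestor(bad_part, 0, i, j) else 0))
--     return abp
-- ===== SOURCE B (Python) =====
-- def asc_bp(bad_part, asc_col, n):
--     rows = len(bad_part)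
--     width = max(len(asc_col), max((len(r) for r in bad_part), default=0))
--
--     def val(x, y):
--         r = bad_part[x]
--         return r[y] if y < len(r) else 0
--
--     iszero = [(not r) or r[0] < 1 for r in bad_part]
--     # prev[x] = set of ancestors of row x at column level -1 (restricted to indices <= x)
--     prev = [{x} if iszero[x] else set(range(x + 1)) for x in range(rows)]
--     tables = []  # tables[y][x] = set of ancestors of row x at column y
--     for yy in range(width):
--         cur_tab = []
--         for x in range(rows):
--             if iszero[x]:
--                 cur_tab.append({x})
--                 continue
--             s = {x}
--             cur = x
--             for p in reversed(range(x)):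
--                 if val(p, yy) < val(cur, yy) and p in prev[cur]:
--                     cur = p
--                     s.add(p)
--             cur_tab.append(s)
--         tables.append(cur_tab)
--         prev = cur_tab
--     out = []
--     for i in range(rows):
--         row = []
--         for j in range(width):
--             base = val(i, j)
--             add = (asc_col[j] if j < len(asc_col) else 0) * n if 0 in tables[j][i] else 0
--             row.append(base + add)
--         out.append(row)
--     return out
-- ===== Notes on version B (the rewrite author's own statement) =====
-- stated objective: faster
-- what changed: Replaces A's exponential top-down is_ancestor recursion by a bottom-up dynamic program that builds, column by column, the full table of ancestor sets, so each (row, column) chain walk is done once instead of being recomputed inside every recursive call.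
import Mathlib
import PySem

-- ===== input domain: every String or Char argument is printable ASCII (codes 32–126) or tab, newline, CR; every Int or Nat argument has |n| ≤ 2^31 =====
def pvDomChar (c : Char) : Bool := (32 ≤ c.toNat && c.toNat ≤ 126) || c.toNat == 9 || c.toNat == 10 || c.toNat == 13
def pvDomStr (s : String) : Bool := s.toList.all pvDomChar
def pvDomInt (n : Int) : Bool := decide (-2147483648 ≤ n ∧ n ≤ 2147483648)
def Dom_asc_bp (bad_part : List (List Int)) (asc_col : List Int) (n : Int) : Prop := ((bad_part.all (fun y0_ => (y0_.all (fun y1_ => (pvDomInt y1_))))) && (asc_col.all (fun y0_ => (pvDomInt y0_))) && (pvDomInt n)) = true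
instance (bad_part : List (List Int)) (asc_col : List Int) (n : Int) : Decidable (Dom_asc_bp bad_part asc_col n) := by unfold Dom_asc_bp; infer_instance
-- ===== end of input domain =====

-- B replaces A's exponential top-down is_ancestor recursion by a bottom-up, column-by-column
-- dynamic program over ancestor sets (objective: faster, asymptotic).

-- ===== PORT A =====

def extractA (m : List (List Int)) (x y : Int) : Int :=
  if x > (m.length : Int) - 1 ∨ x < 0 ∨ y < 0 then -1
  else
    let row := PySem.List.pyGetD m x []          -- m[x]; the guard above puts x in range
    if y > (row.length : Int) - 1 then 0
    else PySem.List.pyGetD row y 0               -- row[y]; the guards put y in range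

def zeroA (m : List (List Int)) (x : Int) : Int :=
  if extractA m x 0 < 1 then 1 else 0

-- Python's `while p >= xa:` loop of is_ancestor; `c` counts the remaining iterations
-- ((x - xa).toNat + 1 at entry is exact: p decreases by 1 every iteration until p < xa).
def isAncLoopA (m : List (List Int)) (xa y : Int) (recv : Int → Int → Int) :
    Int → Int → Nat → Int
  | _, _, 0 => 0
  | x, p, c + 1 =>
    if p ≥ xa then
      if extractA m p y < extractA m x y ∧ recv p x ≠ 0 then
        if xa = p then 1
        else isAncLoopA m xa y recv p (p - 1) c
      else isAncLoopA m xa y recv x (p - 1) c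
    else 0

-- is_ancestor; the recursion descends on y, so fuel (y+1).toNat + 1 is exact
-- (each nested call passes fuel-1 together with y-1).
def isAncGoA (m : List (List Int)) : Nat → Int → Int → Int → Int
  | 0, _, _, _ => 0
  | f + 1, xa, x, y =>
    if xa = x then 1
    else if zeroA m x ≠ 0 then 0
    else if y < 0 then 1
    else isAncLoopA m xa y (fun p c => isAncGoA m f p c (y - 1)) x x ((x - xa).toNat + 1)

def isAncestorA (m : List (List Int)) (xa x y : Int) : Int :=
  isAncGoA m ((y + 1).toNat + 1) xa x y

def asc_bp (bad_part : List (List Int)) (asc_col : List Int) (n : Int) : List (List Int) :=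
  -- Python: y = max(len(asc_col), max(len(row) for row in bad_part)); max over the generator
  -- raises ValueError when bad_part = [] (excluded by Pre_); on nonempty bad_part foldl max 0 agrees.
  let y : Nat := max asc_col.length ((bad_part.map List.length).foldl max 0)
  (List.range bad_part.length).map (fun (i : Nat) =>
    (List.range y).map (fun (j : Nat) =>
      extractA bad_part (i : Int) (j : Int) +
        (if isAncestorA bad_part 0 (i : Int) (j : Int) ≠ 0
         then extractA [asc_col] 0 (j : Int) * n else 0)))

-- ===== PORT B =====

def valB (bad_part : List (List Int)) (x y : Nat) : Int :=
  let r := bad_part.getD x []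
  if y < r.length then r.getD y 0 else 0

def iszeroB (r : List Int) : Bool :=
  r.isEmpty || decide (r.getD 0 0 < 1)

-- one step of B's chain walk (state = (cur, s))
def stepB (bad_part : List (List Int)) (prev : List (PySem.Set Int)) (yy : Nat)
    (st : Nat × PySem.Set Int) (p : Nat) : Nat × PySem.Set Int :=
  if valB bad_part p yy < valB bad_part st.1 yy ∧ (p : Int) ∈ prev.getD st.1 [] then
    (p, PySem.Set.add st.2 (p : Int))
  else st

def chainRowB (bad_part : List (List Int)) (prev : List (PySem.Set Int)) (yy x : Nat) :
    PySem.Set Int :=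
  if iszeroB (bad_part.getD x []) then PySem.Set.ofList [(x : Int)]
  else ((List.range x).reverse.foldl (stepB bad_part prev yy)
          (x, PySem.Set.ofList [(x : Int)])).2

def tableB (bad_part : List (List Int)) (prev : List (PySem.Set Int)) (yy rows : Nat) :
    List (PySem.Set Int) :=
  (List.range rows).map (chainRowB bad_part prev yy)

def initB (bad_part : List (List Int)) (rows : Nat) : List (PySem.Set Int) :=
  (List.range rows).map (fun x =>
    if iszeroB (bad_part.getD x []) then PySem.Set.ofList [(x : Int)]
    else PySem.Set.ofList ((List.range (x + 1)).map (fun (q : Nat) => (q : Int))))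

def buildB (bad_part : List (List Int)) (rows : Nat) :
    List (PySem.Set Int) → Nat → Nat → List (List (PySem.Set Int))
  | _, _, 0 => []
  | prev, yy, c + 1 =>
    let t := tableB bad_part prev yy rows
    t :: buildB bad_part rows t (yy + 1) c

def asc_bp_alt (bad_part : List (List Int)) (asc_col : List Int) (n : Int) : List (List Int) :=
  let rows := bad_part.length
  let width : Nat := max asc_col.length ((bad_part.map List.length).foldl max 0)
  let tables := buildB bad_part rows (initB bad_part rows) 0 width
  (List.range rows).map (fun (i : Nat) =>
    (List.range width).map (fun (j : Nat) =>
      valB bad_part i j +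
        (if (0 : Int) ∈ (tables.getD j []).getD i []
         then (if j < asc_col.length then asc_col.getD j 0 else 0) * n else 0)))

-- ===== PRECONDITION & SPEC =====
-- Pre_ excludes exactly bad_part = [], where Python A raises ValueError (max() of an empty generator).
def Pre_asc_bp (bad_part : List (List Int)) (asc_col : List Int) (n : Int) : Prop :=
  bad_part ≠ []
instance (bad_part : List (List Int)) (asc_col : List Int) (n : Int) : Decidable (Pre_asc_bp bad_part asc_col n) := by unfold Pre_asc_bp; infer_instance

def pvWitness_asc_bp : List (List Int) × List Int × Int := ([[1, 0], [2, 1]], [1, 1], 2)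

def Spec_asc_bp (bad_part : List (List Int)) (asc_col : List Int) (n : Int) (out : List (List Int)) : Prop := out = asc_bp_alt bad_part asc_col n
instance (bad_part : List (List Int)) (asc_col : List Int) (n : Int) (out : List (List Int)) : Decidable (Spec_asc_bp bad_part asc_col n out) := by unfold Spec_asc_bp; infer_instance

-- ===== CLAIM (what is proved, stated in full; the proofs are below) =====
def Claim_equal_asc_bp : Prop := ∀ (bad_part : List (List Int)) (asc_col : List Int) (n : Int), Dom_asc_bp bad_part asc_col n → Pre_asc_bp bad_part asc_col n → Spec_asc_bp bad_part asc_col n (asc_bp bad_part asc_col n)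

-- ===== LEMMAS AND PROOFS =====

-- the ancestor-set tables, level by level: pvTiter 0 is the (virtual) level y = -1,
-- pvTiter (k+1) is the table for column k
def pvTiter (bad_part : List (List Int)) (rows : Nat) : Nat → List (PySem.Set Int)
  | 0 => initB bad_part rows
  | k + 1 => tableB bad_part (pvTiter bad_part rows k) k rows

theorem pv_loop_zero (m : List (List Int)) (xa y : Int) (recv : Int → Int → Int)
    (x p : Int) : isAncLoopA m xa y recv x p 0 = 0 := rfl

theorem pv_loop_succ (m : List (List Int)) (xa y : Int) (recv : Int → Int → Int)
    (x p : Int) (c : Nat) :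
    isAncLoopA m xa y recv x p (c + 1) =
      if p ≥ xa then
        if extractA m p y < extractA m x y ∧ recv p x ≠ 0 then
          if xa = p then 1 else isAncLoopA m xa y recv p (p - 1) c
        else isAncLoopA m xa y recv x (p - 1) c
      else 0 := rfl

theorem pv_go_succ (m : List (List Int)) (f : Nat) (xa x y : Int) :
    isAncGoA m (f + 1) xa x y =
      if xa = x then 1
      else if zeroA m x ≠ 0 then 0
      else if y < 0 then 1
      else isAncLoopA m xa y (fun p c => isAncGoA m f p c (y - 1)) x x ((x - xa).toNat + 1) := rfl

theorem pv_build_getD (bad_part : List (List Int)) (rows : Nat) :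
    ∀ (c k j : Nat), j < c →
      (buildB bad_part rows (pvTiter bad_part rows k) k c).getD j [] =
        pvTiter bad_part rows (k + j + 1) := by
  intro c
  induction c with
  | zero => intro k j h; omega
  | succ c ih =>
    intro k j hj
    cases j with
    | zero => rfl
    | succ j =>
      have h2 : j < c := by omega
      have h3 := ih (k + 1) j h2
      have h4 : (buildB bad_part rows (pvTiter bad_part rows k) k (c + 1)).getD (j + 1) [] =
          (buildB bad_part rows (pvTiter bad_part rows (k + 1)) (k + 1) c).getD j [] := rfl
      rw [h4, h3]
      congr 1
      omega

theorem pv_extract_val (m : List (List Int)) (x y : Nat) (hx : x < m.length) :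
    extractA m (x : Int) (y : Int) = valB m x y := by
  unfold extractA valB
  have h1 : ¬((x:Int) > (m.length : Int) - 1 ∨ (x:Int) < 0 ∨ (y:Int) < 0) := by
    push_neg; omega
  rw [if_neg h1]
  simp only [PySem.List.pyGetD_natCast]
  by_cases h : y < (m.getD x []).length
  · rw [if_neg (by push_neg; omega), if_pos h]
  · rw [if_pos (by omega), if_neg h]

theorem pv_zero_iff (m : List (List Int)) (x : Nat) (hx : x < m.length) :
    (zeroA m (x : Int) ≠ 0) ↔ iszeroB (m.getD x []) = true := by
  have h0 := pv_extract_val m x 0 hx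
  norm_num at h0
  have hv : (valB m x 0 < 1) ↔ iszeroB (m.getD x []) = true := by
    unfold valB iszeroB
    cases hr : m.getD x [] with
    | nil => simp
    | cons a t => simp [List.getD]
  unfold zeroA
  rw [h0]
  split_ifs with hlt
  · simp only [ne_eq, one_ne_zero, not_false_eq_true, true_iff]
    exact hv.mp hlt
  · simp only [ne_eq, not_true_eq_false, false_iff]
    intro hz
    exact hlt (hv.mpr hz)

theorem pv_extract_asc (ac : List Int) (j : Nat) :
    extractA [ac] 0 (j : Int) = (if j < ac.length then ac.getD j 0 else 0) := by
  unfold extractA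
  rw [if_neg (by simp)]
  simp only [PySem.List.pyGetD_natCast]
  by_cases h : j < ac.length
  · rw [if_pos h, if_neg (by push_neg; simp [List.getD]; omega)]
    simp [List.getD]
  · rw [if_neg h, if_pos (by simp [List.getD]; omega)]

theorem pv_range_reverse_succ (n : Nat) :
    (List.range (n + 1)).reverse = n :: (List.range n).reverse := by
  rw [List.range_succ, List.reverse_append]; rfl

theorem pv_fold_mono (bad_part : List (List Int)) (prev : List (PySem.Set Int)) (yy : Nat)
    (l : List Nat) (st : Nat × PySem.Set Int) (a : Int) :
    a ∈ st.2 → a ∈ (l.foldl (stepB bad_part prev yy) st).2 := by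
  induction l generalizing st with
  | nil => intro h; simpa using h
  | cons p t ih =>
    intro h
    simp only [List.foldl_cons]
    refine ih _ ?_
    unfold stepB
    split_ifs with hc
    · exact (PySem.Set.mem_add _ _ _).2 (Or.inl h)
    · exact h

theorem pv_fold_mem_le (bad_part : List (List Int)) (prev : List (PySem.Set Int)) (yy : Nat)
    (l : List Nat) (st : Nat × PySem.Set Int) (a : Int) :
    a ∈ (l.foldl (stepB bad_part prev yy) st).2 → a ∈ st.2 ∨ ∃ q ∈ l, a = (q : Int) := by
  induction l generalizing st with
  | nil => intro h; exact Or.inl (by simpa using h)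
  | cons p t ih =>
    intro h
    rcases ih (stepB bad_part prev yy st p) (by simpa using h) with h1 | ⟨q, hq, hq2⟩
    · unfold stepB at h1
      split_ifs at h1 with hc
      · rcases (PySem.Set.mem_add _ _ _).1 h1 with h2 | h2
        · exact Or.inl h2
        · exact Or.inr ⟨p, List.mem_cons_self, h2⟩
      · exact Or.inl h1
    · exact Or.inr ⟨q, List.mem_cons_of_mem _ hq, hq2⟩

-- the loop correspondence at one column, given the previous-level table is correct
theorem pv_loop (bad_part : List (List Int)) (prev : List (PySem.Set Int)) (k : Nat)
    (Hprev : ∀ p c : Nat, p ≤ c → c < bad_part.length →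
      ((isAncestorA bad_part (p : Int) (c : Int) ((k : Int) - 1) ≠ 0) ↔
        (p : Int) ∈ prev.getD c [])) :
    ∀ (pN cur : Nat) (s : PySem.Set Int) (xa : Nat),
      cur < bad_part.length → pN < cur → xa ≤ pN →
      (∀ a ∈ s, (pN : Int) < a) →
      ((isAncLoopA bad_part (xa : Int) (k : Int)
          (fun p c => isAncestorA bad_part p c ((k : Int) - 1))
          (cur : Int) (pN : Int) (pN - xa + 1) ≠ 0) ↔
        (xa : Int) ∈
          ((List.range (pN + 1)).reverse.foldl (stepB bad_part prev k) (cur, s)).2) := by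
  intro pN
  induction pN with
  | zero =>
    intro cur s xa hcur hpc hxa hs
    have hxa0 : xa = 0 := by omega
    subst hxa0
    have h0len : 0 < bad_part.length := by omega
    have hval0 := pv_extract_val bad_part 0 k h0len
    have hvalc := pv_extract_val bad_part cur k hcur
    have hrecv := Hprev 0 cur (Nat.zero_le _) hcur
    rw [pv_range_reverse_succ, List.range_zero, List.reverse_nil, List.foldl_cons,
      List.foldl_nil, pv_loop_succ, if_pos (le_refl ((0:Nat):Int))]
    unfold stepB
    dsimp only
    by_cases hc : valB bad_part 0 k < valB bad_part cur k ∧ ((0:Nat):Int) ∈ prev.getD cur []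
    · rw [if_pos (⟨by rw [hval0, hvalc]; exact hc.1, hrecv.mpr hc.2⟩ :
        extractA bad_part ((0:Nat):Int) (k:Int) < extractA bad_part ((cur:Nat):Int) (k:Int) ∧
          isAncestorA bad_part ((0:Nat):Int) ((cur:Nat):Int) ((k:Int) - 1) ≠ 0)]
      rw [if_pos rfl, if_pos hc]
      simp [PySem.Set.mem_add]
    · rw [if_neg (by
        intro hCA
        exact hc ⟨by rw [← hval0, ← hvalc]; exact hCA.1, hrecv.mp hCA.2⟩)]
      rw [if_neg hc]
      rw [show (0 : Nat) - 0 = 0 from rfl, pv_loop_zero]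
      simp only [ne_eq, not_true_eq_false, false_iff]
      intro hmem
      exact absurd (hs _ hmem) (by omega)
  | succ pN ih =>
    intro cur s xa hcur hpc hxa hs
    have hplen : pN + 1 < bad_part.length := by omega
    have hvalp := pv_extract_val bad_part (pN + 1) k hplen
    have hvalc := pv_extract_val bad_part cur k hcur
    have hrecv := Hprev (pN + 1) cur (by omega) hcur
    have hps : (((pN + 1) : Nat) : Int) - 1 = ((pN : Nat) : Int) := by push_cast; ring
    rw [pv_range_reverse_succ, List.foldl_cons]
    have hcnt : (pN + 1) - xa + 1 = ((pN + 1) - xa) + 1 := rfl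
    rw [pv_loop_succ, if_pos (by exact_mod_cast Nat.cast_le.mpr hxa :
      (((pN + 1) : Nat) : Int) ≥ ((xa : Nat) : Int))]
    unfold stepB
    dsimp only
    by_cases hc : valB bad_part (pN + 1) k < valB bad_part cur k ∧
        (((pN + 1) : Nat) : Int) ∈ prev.getD cur []
    · rw [if_pos (⟨by rw [hvalp, hvalc]; exact hc.1, hrecv.mpr hc.2⟩ :
        extractA bad_part (((pN + 1):Nat):Int) (k:Int) < extractA bad_part ((cur:Nat):Int) (k:Int) ∧
          isAncestorA bad_part (((pN + 1):Nat):Int) ((cur:Nat):Int) ((k:Int) - 1) ≠ 0)]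
      rw [if_pos hc]
      by_cases hxe : xa = pN + 1
      · subst hxe
        rw [if_pos rfl]
        simp only [ne_eq, one_ne_zero, not_false_eq_true, true_iff]
        exact pv_fold_mono _ _ _ _ _ _ ((PySem.Set.mem_add _ _ _).2 (Or.inr rfl))
      · have hxle : xa ≤ pN := by omega
        rw [if_neg (by exact_mod_cast hxe)]
        rw [hps, show (pN + 1) - xa = pN - xa + 1 from by omega]
        refine (ih (pN + 1) (PySem.Set.add s (((pN + 1):Nat):Int)) xa hplen (by omega) hxle ?_)
        intro a ha
        rcases (PySem.Set.mem_add _ _ _).1 ha with h2 | h2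
        · have := hs _ h2
          push_cast at this ⊢
          omega
        · subst h2; push_cast; omega
    · rw [if_neg (by
        intro hCA
        exact hc ⟨by rw [← hvalp, ← hvalc]; exact hCA.1, hrecv.mp hCA.2⟩)]
      rw [if_neg hc]
      by_cases hxe : xa = pN + 1
      · subst hxe
        rw [show (pN + 1) - (pN + 1) = 0 from by omega, pv_loop_zero]
        simp only [ne_eq, not_true_eq_false, false_iff]
        intro hmem
        rcases pv_fold_mem_le bad_part prev k _ _ _ hmem with h1 | ⟨q, hq, hq2⟩
        · exact absurd (hs _ h1) (by omega)
        · have : q < pN + 1 := by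
            have := List.mem_reverse.mp hq
            exact List.mem_range.mp this
          have hqe : pN + 1 = q := by exact_mod_cast hq2
          omega
      · have hxle : xa ≤ pN := by omega
        rw [hps, show (pN + 1) - xa = pN - xa + 1 from by omega]
        refine ih cur s xa hcur (by omega) hxle ?_
        intro a ha
        have := hs _ ha
        push_cast at this ⊢
        omega

-- main correspondence: A's is_ancestor against B's level tables
theorem pv_main (bad_part : List (List Int)) :
    ∀ (k x xa : Nat), x < bad_part.length → xa ≤ x →
      ((isAncestorA bad_part (xa : Int) (x : Int) ((k : Int) - 1) ≠ 0) ↔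
        (xa : Int) ∈ (pvTiter bad_part bad_part.length k).getD x []) := by
  intro k
  induction k with
  | zero =>
    intro x xa hx hxa
    have h1 : isAncestorA bad_part (xa : Int) (x : Int) (((0:Nat) : Int) - 1) =
        isAncGoA bad_part (0 + 1) (xa : Int) (x : Int) (-1) := by
      unfold isAncestorA; norm_num
    rw [h1, pv_go_succ]
    have h2 : (pvTiter bad_part bad_part.length 0).getD x [] =
        (if iszeroB (bad_part.getD x []) then PySem.Set.ofList [((x:Nat) : Int)]
         else PySem.Set.ofList ((List.range (x + 1)).map (fun (q : Nat) => (q : Int)))) := by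
      show (initB bad_part bad_part.length).getD x [] = _
      unfold initB
      rw [PySem.List.getD_map_range _ _ _ _ hx]
    rw [h2]
    by_cases hxx : xa = x
    · subst hxx
      rw [if_pos rfl]
      simp only [ne_eq, one_ne_zero, not_false_eq_true, true_iff]
      split_ifs
      · simp [PySem.Set.mem_ofList]
      · simp only [PySem.Set.mem_ofList, List.mem_map, List.mem_range]
        exact ⟨xa, by omega, rfl⟩
    · have hlt : xa < x := lt_of_le_of_ne hxa hxx
      rw [if_neg (by exact_mod_cast hxx)]
      by_cases hz : iszeroB (bad_part.getD x []) = true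
      · rw [if_pos ((pv_zero_iff bad_part x hx).mpr hz), if_pos hz]
        simp only [ne_eq, not_true_eq_false, false_iff, PySem.Set.mem_ofList,
          List.mem_singleton]
        intro hmm
        exact hxx (by exact_mod_cast hmm)
      · rw [if_neg (fun hne => hz ((pv_zero_iff bad_part x hx).mp hne)),
          if_pos (by norm_num), if_neg hz]
        simp only [ne_eq, one_ne_zero, not_false_eq_true, true_iff, PySem.Set.mem_ofList,
          List.mem_map, List.mem_range]
        exact ⟨xa, by omega, rfl⟩
  | succ k ih =>
    intro x xa hx hxa
    have h1 : isAncestorA bad_part (xa : Int) (x : Int) ((((k+1):Nat) : Int) - 1) =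
        isAncGoA bad_part ((k + 1) + 1) (xa : Int) (x : Int) ((k : Nat) : Int) := by
      unfold isAncestorA
      have e1 : (((k+1):Nat) : Int) - 1 = ((k : Nat) : Int) := by push_cast; ring
      rw [e1]
      congr 1
      all_goals omega
    rw [h1, pv_go_succ]
    have hrec : (fun p c => isAncGoA bad_part (k + 1) p c (((k:Nat) : Int) - 1)) =
        (fun p c => isAncestorA bad_part p c (((k:Nat) : Int) - 1)) := by
      funext p c
      unfold isAncestorA
      congr 1
      have : ((k:Nat) : Int) - 1 + 1 = ((k : Nat) : Int) := by ring
      rw [this, Int.toNat_natCast]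
    rw [hrec]
    have h2 : (pvTiter bad_part bad_part.length (k+1)).getD x [] =
        chainRowB bad_part (pvTiter bad_part bad_part.length k) k x := by
      show (tableB bad_part (pvTiter bad_part bad_part.length k) k bad_part.length).getD x [] = _
      unfold tableB
      rw [PySem.List.getD_map_range _ _ _ _ hx]
    rw [h2]
    unfold chainRowB
    by_cases hxx : xa = x
    · subst hxx
      rw [if_pos rfl]
      simp only [ne_eq, one_ne_zero, not_false_eq_true, true_iff]
      split_ifs
      · simp [PySem.Set.mem_ofList]
      · exact pv_fold_mono _ _ _ _ _ _ (by simp [PySem.Set.mem_ofList])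
    · have hlt : xa < x := lt_of_le_of_ne hxa hxx
      rw [if_neg (by exact_mod_cast hxx)]
      by_cases hz : iszeroB (bad_part.getD x []) = true
      · rw [if_pos ((pv_zero_iff bad_part x hx).mpr hz), if_pos hz]
        simp only [ne_eq, not_true_eq_false, false_iff, PySem.Set.mem_ofList,
          List.mem_singleton]
        intro hmm
        exact hxx (by exact_mod_cast hmm)
      · rw [if_neg (fun hne => hz ((pv_zero_iff bad_part x hx).mp hne)),
          if_neg (by push_neg; positivity), if_neg hz]
        -- first loop iteration: p = x, the strict comparison fails, x := x, p := x - 1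
        have hx1 : 1 ≤ x := by omega
        have hcnt : (((x:Nat):Int) - ((xa:Nat):Int)).toNat + 1 = ((x - xa) - 1 + 1) + 1 := by
          have : (((x:Nat):Int) - ((xa:Nat):Int)) = (((x - xa) : Nat) : Int) := by push_cast; omega
          rw [this, Int.toNat_natCast]
          omega
        rw [hcnt, pv_loop_succ,
          if_pos (by exact_mod_cast Nat.cast_le.mpr hxa : ((x:Nat):Int) ≥ ((xa:Nat):Int)),
          if_neg (by intro hCA; exact absurd hCA.1 (lt_irrefl _))]
        have hpm1 : ((x : Nat) : Int) - 1 = (((x - 1) : Nat) : Int) := by push_cast; omega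
        rw [hpm1, show (x - xa) - 1 + 1 = (x - 1) - xa + 1 from by omega]
        have hfold := pv_loop bad_part (pvTiter bad_part bad_part.length k) k
          (fun p c hpc hcl => ih c p hcl hpc) (x - 1) x (PySem.Set.ofList [((x:Nat) : Int)]) xa
          hx (by omega) (by omega)
          (by
            intro a ha
            simp only [PySem.Set.mem_ofList, List.mem_singleton] at ha
            subst ha
            push_cast
            omega)
        rw [show (x - 1) + 1 = x from by omega] at hfold
        exact hfold

-- ===== VERDICT (by name: the statement is the Claim_ definition above) =====
theorem asc_bp_spec : Claim_equal_asc_bp := by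
  intro bad_part asc_col n _ _
  simp only [Spec_asc_bp, asc_bp, asc_bp_alt]
  refine List.map_congr_left ?_
  intro i hi
  have hi' : i < bad_part.length := List.mem_range.mp hi
  refine List.map_congr_left ?_
  intro j hj
  have hj' : j < max asc_col.length ((bad_part.map List.length).foldl max 0) :=
    List.mem_range.mp hj
  have e1 : extractA bad_part (i : Int) (j : Int) = valB bad_part i j :=
    pv_extract_val bad_part i j hi'
  have e2 : (buildB bad_part bad_part.length (initB bad_part bad_part.length) 0
      (max asc_col.length ((bad_part.map List.length).foldl max 0))).getD j [] =
      pvTiter bad_part bad_part.length (j + 1) := by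
    have := pv_build_getD bad_part bad_part.length
      (max asc_col.length ((bad_part.map List.length).foldl max 0)) 0 j hj'
    simpa using this
  have e3 : (isAncestorA bad_part 0 (i : Int) (j : Int) ≠ 0) ↔
      (0 : Int) ∈ (pvTiter bad_part bad_part.length (j + 1)).getD i [] := by
    have := pv_main bad_part (j + 1) i 0 hi' (Nat.zero_le _)
    have e4 : ((((j+1)):Nat) : Int) - 1 = ((j : Nat) : Int) := by push_cast; ring
    rw [e4] at this
    simpa using this
  rw [e1, e2]
  rw [if_congr e3 (by rw [pv_extract_asc]) rfl]
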